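-- pv_equiv track=rewrite | github.com/deividid/Algorithms_with_Python | graphs/exercise_3.py | dfs
-- ===== SOURCE A (Python) =====
-- def dfs(node, graph, salary):
--     if salary[node] is not None:
--         return salary[node]
--
--     if len(graph[node]) == 0:
--         salary[node] = 1
--         return 1
--     sal = 0
--     for child in graph[node]:
--         sal += dfs(child, graph, salary)
--
--     salary[node] = sal
--     return sal
-- ===== SOURCE B (Python) =====
-- # Bottom-up fixed-point relaxation instead of recursive memoized DFS (no recursion).
-- # NOTE: return value matches A; B may additionally fill salary entries A never visits.
-- def dfs(node, graph, salary):
--     for _ in range(len(salary)):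
--         for n in salary:
--             if salary[n] is None and n in graph:
--                 ch = graph[n]
--                 if all(c in salary and salary[c] is not None for c in ch):
--                     salary[n] = sum(salary[c] for c in ch) if ch else 1
--     return salary[node]
-- ===== Notes on version B (the rewrite author's own statement) =====
-- stated objective: alternative
-- what changed: Replaces A's recursive memoized DFS by an iterative bottom-up fixed-point relaxation: len(salary) rounds over all salary keys, resolving every node whose children are already resolved, then reading off salary[node]; no recursion and no call stack (return-value equivalence; B may fill salary entries A never visits).
import Mathlib
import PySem

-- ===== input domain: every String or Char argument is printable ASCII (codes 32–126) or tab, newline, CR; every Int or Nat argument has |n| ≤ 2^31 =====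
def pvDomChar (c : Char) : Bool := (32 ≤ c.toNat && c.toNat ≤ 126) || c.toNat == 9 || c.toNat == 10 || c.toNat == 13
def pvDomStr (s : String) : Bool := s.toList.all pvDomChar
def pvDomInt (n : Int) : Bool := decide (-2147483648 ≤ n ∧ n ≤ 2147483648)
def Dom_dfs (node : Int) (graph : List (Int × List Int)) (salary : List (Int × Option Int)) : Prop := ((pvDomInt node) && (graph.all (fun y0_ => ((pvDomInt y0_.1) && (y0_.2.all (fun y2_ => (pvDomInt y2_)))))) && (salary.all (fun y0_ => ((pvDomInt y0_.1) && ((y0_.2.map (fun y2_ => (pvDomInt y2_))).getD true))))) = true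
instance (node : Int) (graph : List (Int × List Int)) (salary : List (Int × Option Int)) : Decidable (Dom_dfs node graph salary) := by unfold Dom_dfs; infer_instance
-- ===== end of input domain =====

-- ===== PORT A =====
-- B replaces A's recursive memoized DFS by round-based bottom-up relaxation (alternative
-- decomposition, no recursion). Equivalence is about the RETURN value only: both Pythons
-- mutate `salary`, and B may fill entries A never visits.
-- A is recursive and Python raises RecursionError on cycles; the port uses fuel
-- (salary.length + 1, enough for every input admitted by Pre_) and returns `none`
-- (mapped to a default never reached under Pre_) where Python raises.

/-- children loop of A: `for child in graph[node]: sal += dfs(child, ...)`,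
    threading the mutated salary table; `f` is `dfs` at the smaller fuel. -/
def dfsARunList (f : Int → PySem.Dict Int (Option Int) → Option (Int × PySem.Dict Int (Option Int))) :
    List Int → PySem.Dict Int (Option Int) → Int → Option (Int × PySem.Dict Int (Option Int))
  | [], s, acc => some (acc, s)
  | c :: rest, s, acc =>
    match f c s with
    | none => none
    | some (v, s') => dfsARunList f rest s' (acc + v)

/-- literal port of A's recursion; `none` = the Python raises (KeyError / RecursionError). -/
def dfsAFuel : Nat → Int → PySem.Dict Int (List Int) → PySem.Dict Int (Option Int) →
    Option (Int × PySem.Dict Int (Option Int))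
  | 0, _, _, _ => none
  | (fuel + 1), node, g, s =>
    match PySem.Dict.get? s node with
    | none => none                                    -- salary[node] : KeyError
    | some (some v) => some (v, s)                    -- memo hit: return salary[node]
    | some none =>
      match PySem.Dict.get? g node with
      | none => none                                  -- graph[node] : KeyError
      | some children =>
        if children.isEmpty then
          some (1, PySem.Dict.insert s node (some 1)) -- salary[node] = 1; return 1
        else
          match dfsARunList (fun c s => dfsAFuel fuel c g s) children s 0 with
          | none => none
          | some (sal, s') => some (sal, PySem.Dict.insert s' node (some sal))

def dfs (node : Int) (graph : List (Int × List Int)) (salary : List (Int × Option Int)) : Int :=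
  match dfsAFuel (salary.length + 1) node (PySem.Dict.mk graph) (PySem.Dict.mk salary) with
  | some (v, _) => v
  | none => 0

-- ===== PORT B =====

/-- `salary[c] is not None` (with `c in salary`) on the current table. -/
def pvIsSet (t : PySem.Dict Int (Option Int)) (c : Int) : Bool :=
  match PySem.Dict.get? t c with
  | some (some _) => true
  | _ => false

/-- `salary[c]` once known to be set (0 is never read under that guard). -/
def pvGetVal (t : PySem.Dict Int (Option Int)) (c : Int) : Int :=
  match PySem.Dict.get? t c with
  | some (some v) => v
  | _ => 0

/-- one key of B's inner loop: resolve `n` if unset, present in graph, children all set. -/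
def pvStepKey (g : PySem.Dict Int (List Int)) (t : PySem.Dict Int (Option Int)) (n : Int) :
    PySem.Dict Int (Option Int) :=
  match PySem.Dict.get? t n with
  | some none =>
    match PySem.Dict.get? g n with
    | none => t
    | some ch =>
      if ch.all (pvIsSet t) then
        PySem.Dict.insert t n
          (some (if ch.isEmpty then 1 else ch.foldl (fun a c => a + pvGetVal t c) 0))
      else t
  | _ => t

/-- one round: `for n in salary: ...` (keys are never added/removed, so the snapshot is faithful). -/
def pvRound (g : PySem.Dict Int (List Int)) (t : PySem.Dict Int (Option Int)) :
    PySem.Dict Int (Option Int) :=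
  (PySem.Dict.keys t).foldl (pvStepKey g) t

def dfs_alt (node : Int) (graph : List (Int × List Int)) (salary : List (Int × Option Int)) : Int :=
  let g := PySem.Dict.mk graph
  let t := (List.range salary.length).foldl (fun t _ => pvRound g t) (PySem.Dict.mk salary)
  pvGetVal t node

-- ===== PRECONDITION & SPEC =====

/-- well-foundedness / closure check (computes no values): node `n` is resolvable within `k`
    levels — it is a salary key and is either memoized or a graph key all of whose children
    are resolvable one level lower. -/
def pvRes (g : PySem.Dict Int (List Int)) (s0 : PySem.Dict Int (Option Int)) :
    Nat → Int → Bool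
  | 0, _ => false
  | (k + 1), n =>
    match PySem.Dict.get? s0 n with
    | none => false
    | some (some _) => true
    | some none =>
      match PySem.Dict.get? g n with
      | none => false
      | some ch => ch.all (fun c => pvRes g s0 k c)

-- Pre_: exactly the inputs on which A returns. Elsewhere A raises (KeyError on a missing
-- salary/graph key, RecursionError on a cycle). A's domain is not expressible by bounds alone:
-- it is the graph-shape property "the memo closure needed for `node` is present in both tables
-- and well-founded" (like acyclicity). pvRes states it as a Datalog-style derivability check on
-- the INPUT tables only: it computes no values, threads no state and is independent of either
-- port's traversal/memoisation order. A minimal derivation passes through pairwise-distinct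
-- salary keys, so depth salary.length is exhaustive.
def Pre_dfs (node : Int) (graph : List (Int × List Int)) (salary : List (Int × Option Int)) : Prop :=
  pvRes (PySem.Dict.mk graph) (PySem.Dict.mk salary) salary.length node = true

instance (node : Int) (graph : List (Int × List Int)) (salary : List (Int × Option Int)) :
    Decidable (Pre_dfs node graph salary) := by unfold Pre_dfs; infer_instance

def pvWitness_dfs : Int × (List (Int × List Int)) × (List (Int × Option Int)) :=
  (0, [(0, [1, 2]), (1, []), (2, [])], [(0, none), (1, none), (2, some 5)])

def Spec_dfs (node : Int) (graph : List (Int × List Int)) (salary : List (Int × Option Int)) (out : Int) : Prop := out = dfs_alt node graph salary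
instance (node : Int) (graph : List (Int × List Int)) (salary : List (Int × Option Int)) (out : Int) : Decidable (Spec_dfs node graph salary out) := by unfold Spec_dfs; infer_instance

-- ===== CLAIM (what is proved, stated in full; the proofs are below) =====
def Claim_equal_dfs : Prop := ∀ (node : Int) (graph : List (Int × List Int)) (salary : List (Int × Option Int)), Dom_dfs node graph salary → Pre_dfs node graph salary → Spec_dfs node graph salary (dfs node graph salary)

-- ===== LEMMAS AND PROOFS =====

/-- spec value function (proof-only): the value the task assigns to a node, by fuel recursion
    over the initial tables. -/
def pvFvalList (f : Int → Option Int) : List Int → Option (List Int)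
  | [] => some []
  | c :: cs =>
    match f c, pvFvalList f cs with
    | some v, some vs => some (v :: vs)
    | _, _ => none

def pvFval (g : PySem.Dict Int (List Int)) (s0 : PySem.Dict Int (Option Int)) :
    Nat → Int → Option Int
  | 0, _ => none
  | (k + 1), n =>
    match PySem.Dict.get? s0 n with
    | none => none
    | some (some v) => some v
    | some none =>
      match PySem.Dict.get? g n with
      | none => none
      | some ch =>
        if ch.isEmpty then some 1
        else (pvFvalList (fun c => pvFval g s0 k c) ch).map (fun vs => vs.foldl (· + ·) 0)

/-- invariant tying a mutated salary table to the initial one and the spec values. -/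
def pvInv (g : PySem.Dict Int (List Int)) (s0 t : PySem.Dict Int (Option Int)) : Prop :=
  (∀ n, PySem.Dict.get? t n = none ↔ PySem.Dict.get? s0 n = none) ∧
  (∀ n v, PySem.Dict.get? s0 n = some (some v) → PySem.Dict.get? t n = some (some v)) ∧
  (∀ n v, PySem.Dict.get? t n = some (some v) → ∃ k, pvFval g s0 k n = some v)

theorem pvFoldlAdd : ∀ (l : List Int) (a b : Int),
    l.foldl (· + ·) (a + b) = a + l.foldl (· + ·) b := by
  intro l
  induction l with
  | nil => intro a b; simp
  | cons c l ih => intro a b; simp only [List.foldl_cons]; rw [add_assoc]; exact ih a (b + c)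

theorem pvFoldlAdd0 (v : Int) (l : List Int) :
    (v :: l).foldl (· + ·) 0 = v + l.foldl (· + ·) 0 := by
  have h := pvFoldlAdd l v 0
  simpa using h

theorem pvFvalList_mono_aux {f f' : Int → Option Int}
    (hf : ∀ c v, f c = some v → f' c = some v) :
    ∀ cs vs, pvFvalList f cs = some vs → pvFvalList f' cs = some vs := by
  intro cs
  induction cs with
  | nil => intro vs h; simp [pvFvalList] at h ⊢; exact h
  | cons c cs ih =>
    intro vs h
    simp only [pvFvalList] at h ⊢
    cases hc : f c with
    | none => rw [hc] at h; simp at h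
    | some v0 =>
      rw [hc] at h
      cases hl : pvFvalList f cs with
      | none => rw [hl] at h; simp at h
      | some vs0 =>
        rw [hl] at h; simp at h
        rw [hf c v0 hc, ih vs0 hl]
        simp [h]

theorem pvFval_succ_node (g : PySem.Dict Int (List Int)) (s0 : PySem.Dict Int (Option Int))
    (k : Nat) (n : Int) (ch : List Int)
    (hs : PySem.Dict.get? s0 n = some none) (hg : PySem.Dict.get? g n = some ch)
    (he : ¬ ch.isEmpty = true) :
    pvFval g s0 (k + 1) n
      = (pvFvalList (fun c => pvFval g s0 k c) ch).map (fun vs => vs.foldl (· + ·) 0) := by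
  conv_lhs => rw [pvFval]
  simp [hs, hg, he]

theorem pvFval_mono (g : PySem.Dict Int (List Int)) (s0 : PySem.Dict Int (Option Int))
    (k : Nat) : ∀ n v, pvFval g s0 k n = some v → pvFval g s0 (k + 1) n = some v := by
  induction k with
  | zero => intro n v h; simp [pvFval] at h
  | succ k ih =>
    intro n v h
    cases hs : PySem.Dict.get? s0 n with
    | none => simp [pvFval, hs] at h
    | some o =>
      cases o with
      | some w => simp [pvFval, hs] at h ⊢; exact h
      | none =>
        cases hg : PySem.Dict.get? g n with
        | none => simp [pvFval, hs, hg] at h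
        | some ch =>
          by_cases he : ch.isEmpty = true
          · simp [pvFval, hs, hg, he] at h ⊢; exact h
          · rw [pvFval_succ_node g s0 k n ch hs hg he] at h
            rw [pvFval_succ_node g s0 (k + 1) n ch hs hg he]
            rcases hmap : pvFvalList (fun c => pvFval g s0 k c) ch with _ | vs
            · rw [hmap] at h; simp at h
            · rw [hmap] at h; simp at h
              rw [pvFvalList_mono_aux (fun c v hc => ih c v hc) ch vs hmap]
              simp [h]

theorem pvFval_le (g : PySem.Dict Int (List Int)) (s0 : PySem.Dict Int (Option Int))
    {k k' : Nat} (h : k ≤ k') : ∀ n v, pvFval g s0 k n = some v → pvFval g s0 k' n = some v := by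
  induction k', h using Nat.le_induction with
  | base => exact fun n v hv => hv
  | succ k' hk ih => exact fun n v hv => pvFval_mono g s0 k' n v (ih n v hv)

theorem pvFval_unique (g : PySem.Dict Int (List Int)) (s0 : PySem.Dict Int (Option Int))
    {k k' : Nat} {n : Int} {v v' : Int}
    (h : pvFval g s0 k n = some v) (h' : pvFval g s0 k' n = some v') : v = v' := by
  rcases le_total k k' with hle | hle
  · have hv := pvFval_le g s0 hle n v h
    rw [hv] at h'
    injection h' with hh
  · have hv' := pvFval_le g s0 hle n v' h'
    rw [hv'] at h
    injection h with hh
    exact hh.symm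

theorem pvAll_iff_fvalList {p : Int → Bool} {f : Int → Option Int}
    (hpf : ∀ c, p c = true ↔ ∃ v, f c = some v) :
    ∀ cs : List Int, cs.all p = true ↔ ∃ vs, pvFvalList f cs = some vs := by
  intro cs
  induction cs with
  | nil => simp [pvFvalList]
  | cons c cs ih =>
    simp only [List.all_cons, Bool.and_eq_true]
    constructor
    · rintro ⟨hc, hcs⟩
      obtain ⟨v, hv⟩ := (hpf c).1 hc
      obtain ⟨vs, hvs⟩ := ih.1 hcs
      exact ⟨v :: vs, by simp [pvFvalList, hv, hvs]⟩
    · rintro ⟨vs, hvs⟩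
      simp only [pvFvalList] at hvs
      cases hc : f c with
      | none => rw [hc] at hvs; simp at hvs
      | some v =>
        rw [hc] at hvs
        cases hl : pvFvalList f cs with
        | none => rw [hl] at hvs; simp at hvs
        | some vs0 => exact ⟨(hpf c).2 ⟨v, hc⟩, ih.2 ⟨vs0, hl⟩⟩

theorem pvRes_iff (g : PySem.Dict Int (List Int)) (s0 : PySem.Dict Int (Option Int))
    (k : Nat) : ∀ n, pvRes g s0 k n = true ↔ ∃ v, pvFval g s0 k n = some v := by
  induction k with
  | zero => intro n; simp [pvRes, pvFval]
  | succ k ih =>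
    intro n
    cases hs : PySem.Dict.get? s0 n with
    | none => simp [pvRes, pvFval, hs]
    | some o =>
      cases o with
      | some w => simp [pvRes, pvFval, hs]
      | none =>
        cases hg : PySem.Dict.get? g n with
        | none => simp [pvRes, pvFval, hs, hg]
        | some ch =>
          by_cases he : ch.isEmpty = true
          · have hnil := List.isEmpty_iff.1 he
            subst hnil
            simp [pvRes, pvFval, hs, hg]
          · constructor
            · intro h
              have h' : ch.all (fun c => pvRes g s0 k c) = true := by
                simpa [pvRes, hs, hg] using h
              obtain ⟨vs, hvs⟩ := (pvAll_iff_fvalList ih ch).1 h'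
              exact ⟨vs.foldl (· + ·) 0, by simp [pvFval, hs, hg, he, hvs]⟩
            · rintro ⟨v, hv⟩
              simp [pvFval, hs, hg, he] at hv
              obtain ⟨vs, hvs, -⟩ := hv
              have h' := (pvAll_iff_fvalList ih ch).2 ⟨vs, hvs⟩
              simpa [pvRes, hs, hg] using h'

theorem pvInv_init (g : PySem.Dict Int (List Int)) (s0 : PySem.Dict Int (Option Int)) :
    pvInv g s0 s0 :=
  ⟨fun _ => Iff.rfl, fun _ _ h => h, fun n v h => ⟨1, by simp [pvFval, h]⟩⟩

theorem pvInv_insert (g : PySem.Dict Int (List Int)) {s0 t : PySem.Dict Int (Option Int)}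
    (hI : pvInv g s0 t) {n : Int} {v : Int}
    (h0 : PySem.Dict.get? s0 n = some none) (hk : ∃ k, pvFval g s0 k n = some v) :
    pvInv g s0 (PySem.Dict.insert t n (some v)) := by
  obtain ⟨I1, I2, I3⟩ := hI
  refine ⟨?_, ?_, ?_⟩
  · intro m
    rw [PySem.Dict.get?_insert]
    by_cases hm : m = n
    · subst hm; simp [h0]
    · simp [hm]; exact I1 m
  · intro m w hw
    rw [PySem.Dict.get?_insert]
    by_cases hm : m = n
    · subst hm; rw [hw] at h0; simp at h0
    · simp [hm]; exact I2 m w hw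
  · intro m w
    rw [PySem.Dict.get?_insert]
    by_cases hm : m = n
    · subst hm
      intro hw
      obtain ⟨k, hkv⟩ := hk
      have hvw : v = w := by simpa using hw
      exact ⟨k, hvw ▸ hkv⟩
    · simp [hm]; exact I3 m w

theorem dfsARunList_sound (g : PySem.Dict Int (List Int)) (s0 : PySem.Dict Int (Option Int))
    (k fuel : Nat)
    (hP : ∀ n v t, pvFval g s0 k n = some v → pvInv g s0 t →
        ∃ t', dfsAFuel fuel n g t = some (v, t') ∧ pvInv g s0 t') :
    ∀ (cs : List Int) (vs : List Int) (acc : Int) (t : PySem.Dict Int (Option Int)),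
      pvFvalList (fun c => pvFval g s0 k c) cs = some vs → pvInv g s0 t →
      ∃ t', dfsARunList (fun c s => dfsAFuel fuel c g s) cs t acc
              = some (acc + vs.foldl (· + ·) 0, t') ∧ pvInv g s0 t' := by
  intro cs
  induction cs with
  | nil =>
    intro vs acc t hvs hI
    simp [pvFvalList] at hvs
    subst hvs
    exact ⟨t, by simp [dfsARunList], hI⟩
  | cons c cs ihl =>
    intro vs acc t hvs hI
    simp only [pvFvalList] at hvs
    cases hc : pvFval g s0 k c with
    | none => rw [hc] at hvs; simp at hvs
    | some v0 =>
      rw [hc] at hvs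
      cases hl : pvFvalList (fun c => pvFval g s0 k c) cs with
      | none => rw [hl] at hvs; simp at hvs
      | some vs0 =>
        rw [hl] at hvs; simp at hvs
        subst hvs
        obtain ⟨t1, h1, hI1⟩ := hP c v0 t hc hI
        obtain ⟨t', h2, hI2⟩ := ihl vs0 (acc + v0) t1 hl hI1
        refine ⟨t', ?_, hI2⟩
        have hsum : acc + (v0 :: vs0).foldl (· + ·) 0 = acc + v0 + vs0.foldl (· + ·) 0 := by
          rw [pvFoldlAdd0]; ring
        simp only [dfsARunList, h1]
        rw [h2, hsum]

theorem dfsA_sound (g : PySem.Dict Int (List Int)) (s0 : PySem.Dict Int (Option Int)) :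
    ∀ (k fuel : Nat) (n : Int) (v : Int) (t : PySem.Dict Int (Option Int)),
      pvFval g s0 k n = some v → k ≤ fuel → pvInv g s0 t →
      ∃ t', dfsAFuel fuel n g t = some (v, t') ∧ pvInv g s0 t' := by
  intro k
  induction k with
  | zero => intro fuel n v t hv _ _; simp [pvFval] at hv
  | succ k ih =>
    intro fuel n v t hv hle hI
    obtain ⟨fuel, rfl⟩ : ∃ f, fuel = f + 1 := ⟨fuel - 1, by omega⟩
    cases hs : PySem.Dict.get? s0 n with
    | none => simp [pvFval, hs] at hv
    | some o =>
      cases o with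
      | some w =>
        have hw : w = v := by simpa [pvFval, hs] using hv
        have ht : PySem.Dict.get? t n = some (some w) := hI.2.1 n w hs
        exact ⟨t, by simp [dfsAFuel, ht, hw], hI⟩
      | none =>
        cases ht : PySem.Dict.get? t n with
        | none => exact absurd ((hI.1 n).1 ht) (by simp [hs])
        | some o' =>
          cases o' with
          | some w =>
            obtain ⟨k', hk'⟩ := hI.2.2 n w ht
            have hw : w = v := pvFval_unique g s0 hk' hv
            exact ⟨t, by simp [dfsAFuel, ht, hw], hI⟩
          | none =>
            cases hg : PySem.Dict.get? g n with
            | none => simp [pvFval, hs, hg] at hv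
            | some ch =>
              by_cases he : ch.isEmpty = true
              · have hv1 : (1 : Int) = v := by simpa [pvFval, hs, hg, he] using hv
                subst hv1
                refine ⟨PySem.Dict.insert t n (some 1), ?_, ?_⟩
                · simp [dfsAFuel, ht, hg, he]
                · exact pvInv_insert g hI hs ⟨k + 1, by simp [pvFval, hs, hg, he]⟩
              · rcases hmap : pvFvalList (fun c => pvFval g s0 k c) ch with _ | vs
                · exfalso; simp [pvFval, hs, hg, he, hmap] at hv
                · have hfold : vs.foldl (· + ·) 0 = v := by
                    simpa [pvFval, hs, hg, he, hmap] using hv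
                  have hk_le : k ≤ fuel := by omega
                  obtain ⟨t', hrun, hI'⟩ :=
                    dfsARunList_sound g s0 k fuel
                      (fun n v t hv hI => ih fuel n v t hv hk_le hI)
                      ch vs 0 t hmap hI
                  refine ⟨PySem.Dict.insert t' n (some v), ?_, ?_⟩
                  · simp [dfsAFuel, ht, hg, he, hrun, hfold]
                  · exact pvInv_insert g hI' hs ⟨k + 1, hv⟩

-- B-side lemmas
theorem pvStepKey_mono (g : PySem.Dict Int (List Int)) (t : PySem.Dict Int (Option Int))
    (m n : Int) (v : Int) (h : PySem.Dict.get? t n = some (some v)) :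
    PySem.Dict.get? (pvStepKey g t m) n = some (some v) := by
  simp only [pvStepKey]
  cases htm : PySem.Dict.get? t m with
  | none => simpa using h
  | some o =>
    cases o with
    | some w => simpa using h
    | none =>
      cases hgm : PySem.Dict.get? g m with
      | none => simpa using h
      | some ch =>
        by_cases hall : ch.all (pvIsSet t) = true
        · simp only [hall, if_true]
          rw [PySem.Dict.get?_insert]
          have hnm : ¬ n = m := by
            intro e; subst e; rw [h] at htm; simp at htm
          simp [hnm]; exact h
        · simpa [hall] using h

theorem pvStepKey_not_none (g : PySem.Dict Int (List Int)) (t : PySem.Dict Int (Option Int))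
    (m n : Int) : PySem.Dict.get? (pvStepKey g t m) n = none ↔ PySem.Dict.get? t n = none := by
  simp only [pvStepKey]
  cases htm : PySem.Dict.get? t m with
  | none => simp
  | some o =>
    cases o with
    | some w => simp
    | none =>
      cases hgm : PySem.Dict.get? g m with
      | none => simp
      | some ch =>
        by_cases hall : ch.all (pvIsSet t) = true
        · simp only [hall, if_true]
          rw [PySem.Dict.get?_insert]
          by_cases hnm : n = m
          · subst hnm; simp [htm]
          · simp [hnm]
        · simp [hall]

theorem pvIsSet_step (g : PySem.Dict Int (List Int)) (t : PySem.Dict Int (Option Int))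
    (m c : Int) (h : pvIsSet t c = true) : pvIsSet (pvStepKey g t m) c = true := by
  cases htc : PySem.Dict.get? t c with
  | none => simp [pvIsSet, htc] at h
  | some o =>
    cases o with
    | none => simp [pvIsSet, htc] at h
    | some w =>
      have hm := pvStepKey_mono g t m c w htc
      simp [pvIsSet, hm]

theorem pvFvalList_of_pointwise (g : PySem.Dict Int (List Int)) (s0 : PySem.Dict Int (Option Int)) :
    ∀ (ch : List Int) (w : Int → Int),
      (∀ c ∈ ch, ∃ k, pvFval g s0 k c = some (w c)) →
      ∃ K, pvFvalList (fun c => pvFval g s0 K c) ch = some (ch.map w) := by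
  intro ch
  induction ch with
  | nil => intro w _; exact ⟨0, by simp [pvFvalList]⟩
  | cons c cs ih =>
    intro w h
    obtain ⟨k1, hk1⟩ := h c (by simp)
    obtain ⟨K2, hK2⟩ := ih w (fun c hc => h c (by simp [hc]))
    refine ⟨max k1 K2, ?_⟩
    have h1 : pvFval g s0 (max k1 K2) c = some (w c) :=
      pvFval_le g s0 (le_max_left _ _) c _ hk1
    have h2 : pvFvalList (fun c => pvFval g s0 (max k1 K2) c) cs = some (cs.map w) :=
      pvFvalList_mono_aux (fun c v hv => pvFval_le g s0 (le_max_right k1 K2) c v hv) cs _ hK2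
    simp [pvFvalList, h1, h2]

theorem pvStepKey_inv (g : PySem.Dict Int (List Int)) {s0 t : PySem.Dict Int (Option Int)}
    (hI : pvInv g s0 t) (m : Int) : pvInv g s0 (pvStepKey g t m) := by
  simp only [pvStepKey]
  cases htm : PySem.Dict.get? t m with
  | none => exact hI
  | some o =>
    cases o with
    | some w => exact hI
    | none =>
      cases hgm : PySem.Dict.get? g m with
      | none => exact hI
      | some ch =>
        by_cases hall : ch.all (pvIsSet t) = true
        · simp only [hall, if_true]
          have hs0 : PySem.Dict.get? s0 m = some none := by
            cases hsm : PySem.Dict.get? s0 m with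
            | none => have h := (hI.1 m).2 hsm; rw [htm] at h; simp at h
            | some o =>
              cases o with
              | none => rfl
              | some w => have h := hI.2.1 m w hsm; rw [htm] at h; simp at h
          have hch : ∀ c ∈ ch, ∃ kc, pvFval g s0 kc c = some (pvGetVal t c) := by
            intro c hc
            have hcset : pvIsSet t c = true := List.all_eq_true.1 hall c hc
            cases htc : PySem.Dict.get? t c with
            | none => simp [pvIsSet, htc] at hcset
            | some o =>
              cases o with
              | none => simp [pvIsSet, htc] at hcset
              | some w =>
                obtain ⟨kc, hkc⟩ := hI.2.2 c w htc
                have hgv : pvGetVal t c = w := by simp [pvGetVal, htc]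
                exact ⟨kc, hgv ▸ hkc⟩
          obtain ⟨K, hKlist⟩ := pvFvalList_of_pointwise g s0 ch (pvGetVal t) hch
          have hfv : pvFval g s0 (K + 1) m
              = some (if ch.isEmpty then 1 else ch.foldl (fun a c => a + pvGetVal t c) 0) := by
            by_cases he : ch.isEmpty = true
            · simp [pvFval, hs0, hgm, he]
            · simp [pvFval, hs0, hgm, he, hKlist, List.foldl_map]
          exact pvInv_insert g hI hs0 ⟨K + 1, hfv⟩
        · simpa [hall] using hI

theorem pvFold_mono (g : PySem.Dict Int (List Int)) :
    ∀ (ks : List Int) (t : PySem.Dict Int (Option Int)) (n : Int) (v : Int),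
      PySem.Dict.get? t n = some (some v) →
      PySem.Dict.get? (ks.foldl (pvStepKey g) t) n = some (some v) := by
  intro ks
  induction ks with
  | nil => intro t n v h; simpa using h
  | cons m ks ih =>
    intro t n v h
    simp only [List.foldl_cons]
    exact ih _ n v (pvStepKey_mono g t m n v h)

theorem pvFold_inv (g : PySem.Dict Int (List Int)) {s0 : PySem.Dict Int (Option Int)} :
    ∀ (ks : List Int) {t : PySem.Dict Int (Option Int)}, pvInv g s0 t →
      pvInv g s0 (ks.foldl (pvStepKey g) t) := by
  intro ks
  induction ks with
  | nil => intro t h; simpa using h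
  | cons m ks ih =>
    intro t h
    simp only [List.foldl_cons]
    exact ih (pvStepKey_inv g h m)

theorem pvRound_mono (g : PySem.Dict Int (List Int)) (t : PySem.Dict Int (Option Int))
    (n : Int) (v : Int) (h : PySem.Dict.get? t n = some (some v)) :
    PySem.Dict.get? (pvRound g t) n = some (some v) :=
  pvFold_mono g _ t n v h

theorem pvRound_inv (g : PySem.Dict Int (List Int)) {s0 t : PySem.Dict Int (Option Int)}
    (hI : pvInv g s0 t) : pvInv g s0 (pvRound g t) :=
  pvFold_inv g _ hI

theorem pvFoldStep_progress (g : PySem.Dict Int (List Int)) (ch : List Int) (n : Int)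
    (hg : PySem.Dict.get? g n = some ch) :
    ∀ (ks : List Int) (t : PySem.Dict Int (Option Int)), n ∈ ks →
      ((∃ w, PySem.Dict.get? t n = some (some w)) ∨
        (PySem.Dict.get? t n = some none ∧ ch.all (pvIsSet t) = true)) →
      ∃ w, PySem.Dict.get? (ks.foldl (pvStepKey g) t) n = some (some w) := by
  intro ks
  induction ks with
  | nil => intro t h; simp at h
  | cons m ks ih =>
    intro t hmem hC
    simp only [List.foldl_cons]
    by_cases hnm : n = m
    · subst hnm
      have hstep : ∃ w, PySem.Dict.get? (pvStepKey g t n) n = some (some w) := by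
        rcases hC with ⟨w, hw⟩ | ⟨hn, hall⟩
        · exact ⟨w, pvStepKey_mono g t n n w hw⟩
        · exact ⟨if ch.isEmpty then 1 else ch.foldl (fun a c => a + pvGetVal t c) 0,
            by simp [pvStepKey, hn, hg, hall, PySem.Dict.get?_insert_self]⟩
      obtain ⟨w, hw⟩ := hstep
      exact ⟨w, pvFold_mono g ks _ n w hw⟩
    · have hmem' : n ∈ ks := by
        rcases List.mem_cons.1 hmem with h | h
        · exact absurd h hnm
        · exact h
      apply ih _ hmem'
      rcases hC with ⟨w, hw⟩ | ⟨hn, hall⟩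
      · exact Or.inl ⟨w, pvStepKey_mono g t m n w hw⟩
      · cases hn' : PySem.Dict.get? (pvStepKey g t m) n with
        | none =>
          exact absurd ((pvStepKey_not_none g t m n).1 hn') (by simp [hn])
        | some o =>
          cases o with
          | some w => exact Or.inl ⟨w, rfl⟩
          | none =>
            refine Or.inr ⟨rfl, List.all_eq_true.2 (fun c hc => ?_)⟩
            exact pvIsSet_step g t m c (List.all_eq_true.1 hall c hc)

theorem pvRound_progress (g : PySem.Dict Int (List Int)) (t : PySem.Dict Int (Option Int))
    (n : Int) (ch : List Int) (hmem : n ∈ PySem.Dict.keys t)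
    (hg : PySem.Dict.get? g n = some ch)
    (hc : (∃ w, PySem.Dict.get? t n = some (some w)) ∨
          (PySem.Dict.get? t n = some none ∧ ch.all (pvIsSet t) = true)) :
    ∃ w, PySem.Dict.get? (pvRound g t) n = some (some w) :=
  pvFoldStep_progress g ch n hg (PySem.Dict.keys t) t hmem hc

theorem pvIter_mono (g : PySem.Dict Int (List Int)) :
    ∀ (k : Nat) (t : PySem.Dict Int (Option Int)) (n : Int) (v : Int),
      PySem.Dict.get? t n = some (some v) →
      PySem.Dict.get? ((pvRound g)^[k] t) n = some (some v) := by
  intro k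
  induction k with
  | zero => intro t n v h; simpa using h
  | succ k ih =>
    intro t n v h
    rw [Function.iterate_succ_apply]
    exact ih _ n v (pvRound_mono g t n v h)

theorem pvIter_inv (g : PySem.Dict Int (List Int)) {s0 : PySem.Dict Int (Option Int)} :
    ∀ (k : Nat) {t : PySem.Dict Int (Option Int)}, pvInv g s0 t →
      pvInv g s0 ((pvRound g)^[k] t) := by
  intro k
  induction k with
  | zero => intro t h; simpa using h
  | succ k ih =>
    intro t h
    rw [Function.iterate_succ_apply]
    exact ih (pvRound_inv g h)

theorem pvFvalList_mem {f : Int → Option Int} :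
    ∀ {cs vs}, pvFvalList f cs = some vs → ∀ c ∈ cs, ∃ w, f c = some w := by
  intro cs
  induction cs with
  | nil => intro vs _ c hc; simp at hc
  | cons c0 cs ih =>
    intro vs h c hc
    simp only [pvFvalList] at h
    cases hc0 : f c0 with
    | none => rw [hc0] at h; simp at h
    | some v0 =>
      rw [hc0] at h
      cases hl : pvFvalList f cs with
      | none => rw [hl] at h; simp at h
      | some vs0 =>
        rcases List.mem_cons.1 hc with rfl | hc'
        · exact ⟨v0, hc0⟩
        · exact ih hl c hc'

theorem pvIter_progress (g : PySem.Dict Int (List Int)) (s0 : PySem.Dict Int (Option Int)) :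
    ∀ (k : Nat) (n : Int) (v : Int) (t : PySem.Dict Int (Option Int)),
      pvFval g s0 k n = some v → pvInv g s0 t →
      PySem.Dict.get? ((pvRound g)^[k] t) n = some (some v) := by
  intro k
  induction k with
  | zero => intro n v t hv _; simp [pvFval] at hv
  | succ k ih =>
    intro n v t hv hI
    rw [Function.iterate_succ_apply']
    cases hs : PySem.Dict.get? s0 n with
    | none => simp [pvFval, hs] at hv
    | some o =>
      cases o with
      | some w =>
        have hw : w = v := by simpa [pvFval, hs] using hv
        subst hw
        exact pvRound_mono g _ n w (pvIter_mono g k t n w (hI.2.1 n w hs))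
      | none =>
        cases hg : PySem.Dict.get? g n with
        | none => simp [pvFval, hs, hg] at hv
        | some ch =>
          have hIk := pvIter_inv g k hI
          have hnn : PySem.Dict.get? ((pvRound g)^[k] t) n ≠ none := by
            intro h0
            have h1 := (hIk.1 n).1 h0
            rw [hs] at h1
            simp at h1
          have hmem : n ∈ PySem.Dict.keys ((pvRound g)^[k] t) := by
            by_contra hnm
            exact hnn ((PySem.Dict.get?_eq_none_iff_not_mem_keys _ _).2 hnm)
          have hall : ∀ c ∈ ch, pvIsSet ((pvRound g)^[k] t) c = true := by
            by_cases he : ch.isEmpty = true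
            · have hnil := List.isEmpty_iff.1 he
              intro c hc; rw [hnil] at hc; simp at hc
            · intro c hc
              rcases hmap : pvFvalList (fun c => pvFval g s0 k c) ch with _ | vs
              · exfalso; simp [pvFval, hs, hg, he, hmap] at hv
              · obtain ⟨w, hw⟩ := pvFvalList_mem hmap c hc
                have hres := ih c w t hw hI
                simp [pvIsSet, hres]
          have hC : (∃ w, PySem.Dict.get? ((pvRound g)^[k] t) n = some (some w)) ∨
              (PySem.Dict.get? ((pvRound g)^[k] t) n = some none ∧
                ch.all (pvIsSet ((pvRound g)^[k] t)) = true) := by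
            cases htn : PySem.Dict.get? ((pvRound g)^[k] t) n with
            | none => exact absurd htn hnn
            | some o =>
              cases o with
              | some w => exact Or.inl ⟨w, rfl⟩
              | none => exact Or.inr ⟨rfl, List.all_eq_true.2 hall⟩
          obtain ⟨w, hw⟩ := pvRound_progress g _ n ch hmem hg hC
          have hI' := pvRound_inv g hIk
          obtain ⟨k', hk'⟩ := hI'.2.2 n w hw
          have hwv : w = v := pvFval_unique g s0 hk' hv
          exact hwv ▸ hw

theorem pvFoldRange (g : PySem.Dict Int (List Int)) (m : Nat) (t : PySem.Dict Int (Option Int)) :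
    (List.range m).foldl (fun t _ => pvRound g t) t = (pvRound g)^[m] t := by
  induction m with
  | zero => simp
  | succ m ih => simp [List.range_succ, List.foldl_append, ih, Function.iterate_succ_apply']

-- ===== VERDICT (by name: the statement is the Claim_ definition above) =====
theorem dfs_spec : Claim_equal_dfs := by
  intro node graph salary _ hPre
  unfold Pre_dfs at hPre
  unfold Spec_dfs
  obtain ⟨v, hv⟩ :=
    (pvRes_iff (PySem.Dict.mk graph) (PySem.Dict.mk salary) salary.length node).1 hPre
  obtain ⟨t', hrun, -⟩ :=
    dfsA_sound (PySem.Dict.mk graph) (PySem.Dict.mk salary) salary.length (salary.length + 1)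
      node v (PySem.Dict.mk salary) hv (by omega) (pvInv_init _ _)
  have hprog :=
    pvIter_progress (PySem.Dict.mk graph) (PySem.Dict.mk salary) salary.length node v
      (PySem.Dict.mk salary) hv (pvInv_init _ _)
  have hA : dfs node graph salary = v := by simp [dfs, hrun]
  have hB : dfs_alt node graph salary = v := by
    simp [dfs_alt, pvFoldRange, pvGetVal, hprog]
  rw [hA, hB]
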